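-- pv_equiv track=rewrite | github.com/AP-MI-2021/seminar-3-crismora80 | main.py | nrPozImpareDesc
-- ===== SOURCE A (Python) =====
-- def nrPozImpareDesc(l):
--     '''
--
--     :param l:
--     :return:
--     '''
--
--     ''' modul 1a
--     for i in range(1, len(l) - 2, 2):
--         if l[i] < l[i+2]:
--             return False
--     return True
--     '''
--
--     ''' modul 1b
--     for i in range(3, len(l), 2):
--         if l[i-2] < l[i]:
--             return False
--     return True
--     '''
--
--     ''' modul 3
--     elemPozImpare = []
--     for i in range(1, len(l), 2):
--         elemPozImpare.append(l[i])
--     for i in range(1, len(elemPozImpare)):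
--         if elemPozImpare[i-1] < elemPozImpare[i]:
--             return False
--     return True
--     '''
--
--     ''' modul 4
--     elemPozImpare = l[1::2]
--     elemPozImpareSortate = elemPozImpare[:]
--     elemPozImpareSortate.sort(reverse=True)
--     for i in range(len(elemPozImpare)):
--         if elemPozImpare[i] != elemPozImpareSortate[i]:
--             return False
--     return True
--     '''
--
--     nrPozImpare = l[1::2]
--     for i in range(len(nrPozImpare) - 1):
--         if nrPozImpare[i] < nrPozImpare[i+1]:
--             return False
--     return True
-- ===== SOURCE B (Python) =====
-- def nrPozImpareDesc(l):
--     s = l[1::2]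
--     return s == sorted(s, reverse=True)
-- ===== Notes on version B (the rewrite author's own statement) =====
-- stated objective: simpler
-- what changed: Replaces the adjacent-pair index scan over the odd-position slice with a single comparison of the slice against its descending sort.
import Mathlib
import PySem

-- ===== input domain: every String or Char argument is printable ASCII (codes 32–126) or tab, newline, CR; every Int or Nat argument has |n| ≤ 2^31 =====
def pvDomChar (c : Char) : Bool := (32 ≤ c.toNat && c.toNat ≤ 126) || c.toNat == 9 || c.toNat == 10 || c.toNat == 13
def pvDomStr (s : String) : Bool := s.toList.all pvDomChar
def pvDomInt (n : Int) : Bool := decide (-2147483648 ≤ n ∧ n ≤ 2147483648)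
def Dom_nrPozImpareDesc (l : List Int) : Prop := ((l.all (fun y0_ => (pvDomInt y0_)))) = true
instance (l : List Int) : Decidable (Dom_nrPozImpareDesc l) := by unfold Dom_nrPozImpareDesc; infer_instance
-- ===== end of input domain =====

-- B replaces A's adjacent-pair index scan over the odd-position slice by comparing the slice with its descending sort (simpler, same result).


-- ===== PORT A =====
-- the for-loop 'for i in range(len(s)-1): if s[i] < s[i+1]: return False' with early return
def descLoop (s : List Int) : List Int → Bool
  | [] => true
  | i :: rest =>
    if PySem.List.pyGetD s i 0 < PySem.List.pyGetD s (i + 1) 0 then false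
    else descLoop s rest

def nrPozImpareDesc (l : List Int) : Bool :=
  let s := (PySem.List.slice? l (some 1) none 2).getD []   -- l[1::2]; step 2 ≠ 0, so slice? is always 'some'
  descLoop s (PySem.List.pyRange 0 ((s.length : Int) - 1) 1)

-- ===== PORT B =====
def nrPozImpareDesc_alt (l : List Int) : Bool :=
  let s := (PySem.List.slice? l (some 1) none 2).getD []   -- l[1::2]
  s == PySem.List.sorted s (fun x => x) true               -- s == sorted(s, reverse=True)

-- ===== PRECONDITION & SPEC =====
def Spec_nrPozImpareDesc (l : List Int) (out : Bool) : Prop := out = nrPozImpareDesc_alt l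
instance (l : List Int) (out : Bool) : Decidable (Spec_nrPozImpareDesc l out) := by unfold Spec_nrPozImpareDesc; infer_instance

-- ===== CLAIM (what is proved, stated in full; the proofs are below) =====
def Claim_equal_nrPozImpareDesc : Prop := ∀ (l : List Int), Dom_nrPozImpareDesc l → Spec_nrPozImpareDesc l (nrPozImpareDesc l)

-- ===== LEMMAS AND PROOFS =====

-- getD with a nonnegative index through a cons cell
lemma pyGetD_cons_succ (a : Int) (s : List Int) (k : Int) (hk : 0 ≤ k) :
    PySem.List.pyGetD (a :: s) (k + 1) 0 = PySem.List.pyGetD s k 0 := by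
  obtain ⟨n, rfl⟩ := Int.eq_ofNat_of_zero_le hk
  have h1 : (n : Int) + 1 = ((n + 1 : Nat) : Int) := by push_cast; ring
  rw [h1, PySem.List.pyGetD_natCast, PySem.List.pyGetD_natCast]
  rfl

-- indexing shift: running the loop on a ::-extended list with all indices shifted by one
lemma descLoop_shift (a : Int) (s : List Int) (ks : List Int) (h : ∀ i ∈ ks, 0 ≤ i) :
    descLoop (a :: s) (ks.map (· + 1)) = descLoop s ks := by
  induction ks with
  | nil => rfl
  | cons k t ih =>
    have hk : 0 ≤ k := h k (by simp)
    have h1 := pyGetD_cons_succ a s k hk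
    have h2 := pyGetD_cons_succ a s (k + 1) (by omega)
    simp only [List.map_cons, descLoop, h1, h2]
    split
    · rfl
    · exact ih (fun i hi => h i (by simp [hi]))

-- Pairwise (· ≥ ·) splits at a cons-cons head (via the adjacent-chain view)
lemma pairwise_ge_cons_cons (a b : Int) (u : List Int) :
    (a :: b :: u).Pairwise (fun x y : Int => y ≤ x) ↔
      (b ≤ a ∧ (b :: u).Pairwise (fun x y : Int => y ≤ x)) := by
  constructor
  · intro hp
    rcases List.pairwise_cons.mp hp with ⟨hall, hrest⟩
    exact ⟨hall b (by simp), hrest⟩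
  · intro ⟨hba, hrest⟩
    refine List.pairwise_cons.mpr ⟨?_, hrest⟩
    intro y hy
    rcases List.mem_cons.mp hy with rfl | hyu
    · exact hba
    · exact le_trans (List.rel_of_pairwise_cons hrest hyu) hba

-- A's loop decides the non-increasing condition on the slice
lemma descLoop_pairwise (s : List Int) :
    descLoop s (PySem.List.pyRange 0 ((s.length : Int) - 1) 1) =
      decide (s.Pairwise (fun x y : Int => y ≤ x)) := by
  induction s with
  | nil => simp [PySem.List.pyRange_one_eq_nil (by norm_num : (-1 : Int) ≤ 0), descLoop]
  | cons a t ih =>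
    cases t with
    | nil => simp [PySem.List.pyRange_one_eq_nil (by norm_num : (0 : Int) ≤ 0), descLoop]
    | cons b u =>
      have hlen : ((a :: b :: u).length : Int) - 1 = (u.length : Int) + 1 := by
        simp
      have hcons : PySem.List.pyRange 0 ((u.length : Int) + 1) 1 =
          0 :: PySem.List.pyRange 1 ((u.length : Int) + 1) 1 :=
        PySem.List.pyRange_one_cons (by positivity)
      have hmap : PySem.List.pyRange 1 ((u.length : Int) + 1) 1 =
          (PySem.List.pyRange 0 (u.length : Int) 1).map (· + 1) := by
        have he : ((u.length : Int) + 1) - 1 = (u.length : Int) - 0 := by ring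
        rw [PySem.List.pyRange_one 1, PySem.List.pyRange_one 0, he]
        simp only [List.map_map]
        apply List.map_congr_left
        intro k _
        simp only [Function.comp]
        ring
      have hshift := descLoop_shift a (b :: u) (PySem.List.pyRange 0 (u.length : Int) 1)
        (fun i hi => ((PySem.List.mem_pyRange_one).mp hi).1)
      have hlen2 : ((b :: u).length : Int) - 1 = (u.length : Int) := by simp
      rw [hlen, hcons]
      have hget1 : PySem.List.pyGetD (a :: b :: u) 1 0 = b := by
        rw [(by norm_num : (1 : Int) = 0 + 1), pyGetD_cons_succ a (b :: u) 0 le_rfl,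
            PySem.List.pyGetD_zero_cons]
      show (if PySem.List.pyGetD (a :: b :: u) 0 0 < PySem.List.pyGetD (a :: b :: u) (0 + 1) 0
            then false
            else descLoop (a :: b :: u) (PySem.List.pyRange 1 ((u.length : Int) + 1) 1)) = _
      rw [PySem.List.pyGetD_zero_cons, (by norm_num : (0 : Int) + 1 = 1), hget1, hmap, hshift]
      rw [hlen2] at ih
      rw [ih]
      have hd : decide (List.Pairwise (fun x y : Int => y ≤ x) (a :: b :: u)) =
          decide (b ≤ a ∧ List.Pairwise (fun x y : Int => y ≤ x) (b :: u)) :=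
        decide_eq_decide.mpr (pairwise_ge_cons_cons a b u)
      rw [hd]
      by_cases hab : a < b
      · simp [hab, show ¬ b ≤ a by omega]
      · have hba : b ≤ a := by omega
        simp [hab, hba]

-- B's comparison decides the same condition: a list equals its descending sort iff non-increasing
lemma sorted_rev_eq_pairwise (s : List Int) :
    (s == PySem.List.sorted s (fun x => x) true) =
      decide (s.Pairwise (fun x y : Int => y ≤ x)) := by
  by_cases h : s.Pairwise (fun x y : Int => y ≤ x)
  · have := PySem.List.sorted_rev_eq_self_of_pairwise (key := fun x : Int => x) (xs := s) h
    simp [h, this]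
  · have hne : ¬ (s = PySem.List.sorted s (fun x => x) true) := by
      intro he
      apply h
      have hp := PySem.List.sorted_pairwise_rev (xs := s) (key := fun x : Int => x)
      rw [← he] at hp
      exact hp
    simp [h, hne]

-- ===== VERDICT (by name: the statement is the Claim_ definition above) =====
theorem nrPozImpareDesc_spec : Claim_equal_nrPozImpareDesc := by
  intro l _
  unfold Spec_nrPozImpareDesc nrPozImpareDesc nrPozImpareDesc_alt
  rw [descLoop_pairwise, sorted_rev_eq_pairwise]
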